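-- pv_equiv track=rewrite | github.com/Kliprmimo/WDI_1_sem | zdw_3_2_9.py | arrange_3d
-- ===== SOURCE A (Python) =====
-- def arrange_3d(tab_3d, n):
--     size_2d = n ** 2
--     list_dims = [[0 for _ in range(n ** 2)] for _ in range(n)]
--     i = 0
--     dim = 0
--     for layer in tab_3d:
--         for row in layer:
--             for num in row:
--                 if i < size_2d:
--                     list_dims[dim][i] = num
--                     i += 1
--                 else:
--                     list_dims[dim+1][0] = num
--                     dim += 1
--                     i = 1
--     for x in range(n):
--         list_dims[x].sort()
--     return list_dims
-- ===== SOURCE B (Python) =====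
-- def arrange_3d(tab_3d, n):
--     flat = [num for layer in tab_3d for row in layer for num in row]
--     q = n * n
--     return [sorted(flat[k * q:(k + 1) * q] + [0] * (q - len(flat[k * q:(k + 1) * q])))
--             for k in range(n)]
-- ===== Notes on version B (the rewrite author's own statement) =====
-- stated objective: simpler
-- what changed: B flattens the whole array once and builds each of the n output chunks directly as a zero-padded slice flat[k*n^2:(k+1)*n^2] that it sorts, replacing A's preallocated zero matrix mutated through a running element counter i and a chunk counter dim with an overflow branch.
import Mathlib
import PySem

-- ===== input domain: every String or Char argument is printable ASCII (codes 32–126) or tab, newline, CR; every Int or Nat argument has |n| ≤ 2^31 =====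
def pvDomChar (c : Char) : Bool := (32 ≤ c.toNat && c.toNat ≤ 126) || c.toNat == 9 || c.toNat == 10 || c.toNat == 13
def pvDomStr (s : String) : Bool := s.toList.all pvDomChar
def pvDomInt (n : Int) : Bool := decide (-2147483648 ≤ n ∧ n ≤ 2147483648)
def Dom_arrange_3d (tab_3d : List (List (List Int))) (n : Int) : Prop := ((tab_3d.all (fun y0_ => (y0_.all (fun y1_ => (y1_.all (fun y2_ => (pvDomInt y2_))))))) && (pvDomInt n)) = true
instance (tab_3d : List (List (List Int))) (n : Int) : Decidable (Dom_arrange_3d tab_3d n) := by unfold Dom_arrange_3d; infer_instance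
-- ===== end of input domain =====

-- B flattens once and emits each output chunk as a sorted zero-padded slice, replacing A's
-- preallocated zero matrix mutated through running i/dim counters (objective: simpler).

-- ===== PORT A =====
-- list_dims[d][i] = v ; exact while 0 ≤ d < len(list_dims) and 0 ≤ i < len(row) — Python raises
-- IndexError outside that range, and Pre_ excludes exactly the inputs reaching such a write.
def pvSet2 (ld : List (List Int)) (d i : Int) (v : Int) : List (List Int) :=
  ld.set d.toNat ((ld.getD d.toNat []).set i.toNat v)

-- the body of A's innermost loop, acting on the state (list_dims, i, dim)
def pvStepA (n : Int) (st : List (List Int) × Int × Int) (num : Int) : List (List Int) × Int × Int :=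
  match st with
  | (ld, i, dim) =>
    if i < n ^ 2 then (pvSet2 ld dim i num, i + 1, dim)
    else (pvSet2 ld (dim + 1) 0 num, 1, dim + 1)

def arrange_3d (tab_3d : List (List (List Int))) (n : Int) : List (List Int) :=
  let init : List (List Int) :=
    (PySem.List.pyRange 0 n 1).map (fun _ => (PySem.List.pyRange 0 (n ^ 2) 1).map (fun _ => (0 : Int)))
  let fin := tab_3d.foldl
    (fun st layer => layer.foldl (fun st row => row.foldl (pvStepA n) st) st) (init, 0, 0)
  (PySem.List.pyRange 0 n 1).foldl
    (fun ld x => ld.set x.toNat (PySem.List.sorted (ld.getD x.toNat []) (fun v => v) false)) fin.1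

-- ===== PORT B =====
def arrange_3d_alt (tab_3d : List (List (List Int))) (n : Int) : List (List Int) :=
  let flat := tab_3d.flatMap (fun layer => layer.flatMap (fun row => row))
  let q := n * n
  (PySem.List.pyRange 0 n 1).map (fun k =>
    let chunk := PySem.List.slice flat (some (k * q)) (some ((k + 1) * q))
    PySem.List.sorted (chunk ++ List.replicate (q - (chunk.length : Int)).toNat 0) (fun v => v) false)

-- ===== PRECONDITION & SPEC =====
-- Pre_ excludes exactly the inputs holding more than max(n,0)^3 numbers, on which A raises
-- IndexError (the list_dims[dim+1][0] write runs past the n preallocated chunks).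
def Pre_arrange_3d (tab_3d : List (List (List Int))) (n : Int) : Prop :=
  (tab_3d.flatMap (fun layer => layer.flatMap (fun row => row))).length ≤ n.toNat ^ 3
instance (tab_3d : List (List (List Int))) (n : Int) : Decidable (Pre_arrange_3d tab_3d n) := by
  unfold Pre_arrange_3d; infer_instance
def pvWitness_arrange_3d : List (List (List Int)) × Int := ([[[5, 2], [3]], [[4]]], 2)

def Spec_arrange_3d (tab_3d : List (List (List Int))) (n : Int) (out : List (List Int)) : Prop := out = arrange_3d_alt tab_3d n
instance (tab_3d : List (List (List Int))) (n : Int) (out : List (List Int)) : Decidable (Spec_arrange_3d tab_3d n out) := by unfold Spec_arrange_3d; infer_instance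

-- ===== CLAIM (what is proved, stated in full; the proofs are below) =====
def Claim_equal_arrange_3d : Prop := ∀ (tab_3d : List (List (List Int))) (n : Int), Dom_arrange_3d tab_3d n → Pre_arrange_3d tab_3d n → Spec_arrange_3d tab_3d n (arrange_3d tab_3d n)

-- ===== LEMMAS AND PROOFS =====

-- chunk contents padded with zeroes to length q
def pvPad (q : Nat) (l : List Int) : List Int := l ++ List.replicate (q - l.length) 0

-- the matrix A's write loop has built after consuming the elements xs
def pvMat (q N : Nat) (xs : List Int) : List (List Int) :=
  (List.range N).map (fun k => pvPad q ((xs.drop (k * q)).take q))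

theorem pvMat_length (q N : Nat) (xs : List Int) : (pvMat q N xs).length = N := by
  simp [pvMat]

-- A's three nested loops consume exactly the flattened element stream
theorem pvNest (f : List (List Int) × Int × Int → Int → List (List Int) × Int × Int)
    (tab : List (List (List Int))) (s : List (List Int) × Int × Int) :
    tab.foldl (fun st layer => layer.foldl (fun st row => row.foldl f st) st) s
      = (tab.flatMap (fun layer => layer.flatMap (fun row => row))).foldl f s := by
  have inner : ∀ (layer : List (List Int)) (s : List (List Int) × Int × Int),
      layer.foldl (fun st row => row.foldl f st) s
        = (layer.flatMap (fun row => row)).foldl f s := by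
    intro layer
    induction layer with
    | nil => intro s; simp
    | cons r rest ih => intro s; simp [List.foldl_append, ih]
  induction tab generalizing s with
  | nil => simp
  | cons layer rest ih =>
    rw [List.foldl_cons, inner, List.flatMap_cons, List.foldl_append]; exact ih _

-- one write of A's loop advances the matrix description by one element
theorem pvMatStep (q N : Nat) (ys : List Int) (d i : Nat) (a : Int)
    (hlen : ys.length = d * q + i) (hi : i < q) (hd : d < N) :
    pvSet2 (pvMat q N ys) (d : Int) (i : Int) a = pvMat q N (ys ++ [a]) := by
  have hdq : d * q ≤ ys.length := by omega
  have hpl : (ys.drop (d * q)).length = i := by simp [hlen]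
  unfold pvSet2 pvMat
  simp only [Int.toNat_natCast]
  have hget : ((List.range N).map (fun k => pvPad q ((ys.drop (k * q)).take q))).getD d []
      = pvPad q ((ys.drop (d * q)).take q) := by
    rw [List.getD_eq_getElem _ _ (by simpa using hd)]
    simp
  rw [hget]
  apply List.ext_getElem (by simp)
  intro k hk1 hk2
  have hkN : k < N := by simpa using hk1
  rw [List.getElem_set]
  by_cases hkd : d = k
  · subst hkd
    simp only [if_pos rfl, List.getElem_map, List.getElem_range]
    have htake : (ys.drop (d * q)).take q = ys.drop (d * q) :=
      List.take_of_length_le (by omega)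
    have hdrop : (ys ++ [a]).drop (d * q) = ys.drop (d * q) ++ [a] :=
      List.drop_append_of_le_length hdq
    rw [htake, hdrop]
    have htake2 : (ys.drop (d * q) ++ [a]).take q = ys.drop (d * q) ++ [a] :=
      List.take_of_length_le (by simp [hpl]; omega)
    rw [htake2]
    unfold pvPad
    have hrep : q - (ys.drop (d * q)).length = (q - i - 1) + 1 := by omega
    rw [hrep, List.replicate_succ]
    rw [List.set_append_right _ _ (by omega)]
    simp [hpl]
    omega
  · simp only [if_neg hkd, List.getElem_map, List.getElem_range]
    rcases Nat.lt_or_ge k d with hlt | hge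
    · have hkd2 : k * q + q ≤ d * q := by
        have := Nat.mul_le_mul_right q (show k + 1 ≤ d by omega)
        simpa [add_mul] using this
      have hdropk : (ys ++ [a]).drop (k * q) = ys.drop (k * q) ++ [a] :=
        List.drop_append_of_le_length (by omega)
      rw [hdropk, List.take_append_of_le_length (by simp; omega)]
    · have hgt : d < k := by omega
      have hkd2 : d * q + q ≤ k * q := by
        have := Nat.mul_le_mul_right q (show d + 1 ≤ k by omega)
        simpa [add_mul] using this
      rw [List.drop_eq_nil_of_le (by omega), List.drop_eq_nil_of_le (by simp; omega)]

-- invariant of A's write loop: after consuming ys ++ xs the state is the described matrix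
theorem pvFold (n : Int) (q N : Nat) (hq : q = N ^ 2) (hN : N = n.toNat) :
    ∀ (xs ys : List Int) (d i : Nat),
      ys.length = d * q + i → i ≤ q → (i = 0 → d = 0) →
      ys.length + xs.length ≤ N * q →
      ∃ (d' i' : Nat),
        xs.foldl (pvStepA n) (pvMat q N ys, (i : Int), (d : Int))
          = (pvMat q N (ys ++ xs), (i' : Int), (d' : Int)) := by
  intro xs
  induction xs with
  | nil => intro ys d i h1 h2 h3 h4; exact ⟨d, i, by simp⟩
  | cons a xs ih =>
    intro ys d i h1 h2 h3 h4
    have hpos : 1 ≤ N * q := by simp at h4 ⊢; omega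
    have hNpos : 1 ≤ N := by by_contra h; push_neg at h; interval_cases N <;> omega
    have hqpos : 1 ≤ q := by by_contra h; push_neg at h; interval_cases q <;> omega
    have hn1 : (1 : Int) ≤ n := by omega
    have hnq : (n : Int) ^ 2 = (q : Int) := by
      have : n = (N : Int) := by omega
      rw [this, hq]; push_cast; ring
    rw [List.foldl_cons]
    by_cases hiq : i < q
    · have hd : d < N := by
        by_contra hc; push_neg at hc
        have : N * q ≤ d * q := Nat.mul_le_mul_right q hc
        simp at h4; omega
      have hstep : pvStepA n (pvMat q N ys, (i : Int), (d : Int)) a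
          = (pvMat q N (ys ++ [a]), ((i + 1 : Nat) : Int), (d : Int)) := by
        simp only [pvStepA]
        rw [if_pos (by rw [hnq]; exact_mod_cast hiq)]
        rw [pvMatStep q N ys d i a h1 hiq hd]
        push_cast; ring_nf
      rw [hstep]
      have := ih (ys ++ [a]) d (i + 1) (by simp [h1]; ring) (by omega) (by omega)
        (by simp at h4 ⊢; omega)
      simpa using this
    · have hieq : i = q := by omega
      have hd1 : d + 1 < N := by
        by_contra hc; push_neg at hc
        have : N * q ≤ (d + 1) * q := Nat.mul_le_mul_right q hc
        simp [add_mul] at this h4; omega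
      have hstep : pvStepA n (pvMat q N ys, (i : Int), (d : Int)) a
          = (pvMat q N (ys ++ [a]), ((1 : Nat) : Int), ((d + 1 : Nat) : Int)) := by
        simp only [pvStepA]
        rw [if_neg (by rw [hnq]; omega)]
        have h1' : ys.length = (d + 1) * q + 0 := by rw [add_mul]; omega
        have := pvMatStep q N ys (d + 1) 0 a h1' hqpos hd1
        push_cast at this ⊢
        rw [this]
      rw [hstep]
      have := ih (ys ++ [a]) (d + 1) 1 (by simp [h1, add_mul]; omega) (by omega) (by omega)
        (by simp at h4 ⊢; omega)
      simpa using this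

-- A's preallocated all-zero matrix is the description of the empty stream
theorem pvInitEq (n : Int) (q N : Nat) (hq : q = N ^ 2) (hN : N = n.toNat) :
    (PySem.List.pyRange 0 n 1).map
        (fun _ => (PySem.List.pyRange 0 (n ^ 2) 1).map (fun _ => (0 : Int)))
      = pvMat q N [] := by
  simp only [PySem.List.pyRange_one, List.map_map]
  unfold pvMat pvPad
  rcases Int.lt_or_le n 0 with hneg | hpos
  · have hN0 : N = 0 := by omega
    simp [hN0]
    omega
  · have h1 : (n - 0).toNat = N := by omega
    have h2 : (n ^ 2 - 0).toNat = q := by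
      have hn : n = (N : Int) := by omega
      have hcast : (n ^ 2 - 0 : Int) = ((N ^ 2 : Nat) : Int) := by rw [hn]; push_cast; ring
      rw [hcast, Int.toNat_natCast, hq]
    rw [h1, h2]
    apply List.map_congr_left
    intro k hk
    simp [Function.comp_def]

-- setting every index 0..m-1 of a list to f of its old value is a map
theorem pvSetMap (f : List Int → List Int) :
    ∀ (m : Nat) (l : List (List Int)), m ≤ l.length →
      (List.range m).foldl (fun ld x => ld.set x (f (ld.getD x []))) l
        = (l.take m).map f ++ l.drop m := by
  intro m
  induction m with
  | zero => intro l h; simp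
  | succ m ih =>
    intro l h
    rw [List.range_succ, List.foldl_append, ih l (by omega)]
    have hm : m < l.length := by omega
    have hlen : ((l.take m).map f).length = m := by simp; omega
    have hdrop : l.drop m = l[m] :: l.drop (m + 1) := List.drop_eq_getElem_cons hm
    simp only [List.foldl_cons, List.foldl_nil]
    have hgetD : ((l.take m).map f ++ l.drop m).getD m [] = l[m] := by
      rw [List.getD_append_right _ _ _ _ (by omega), hlen, Nat.sub_self, hdrop]
      simp [List.getElem?_eq_getElem hm]
    rw [hgetD, List.set_append_right _ _ (by omega), hlen, Nat.sub_self, hdrop,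
      List.set_cons_zero]
    have hm' : m < (l.map f).length := by simpa using hm
    simp [List.take_succ_eq_append_getElem hm', List.map_take]

-- A's final in-place sorting pass is a map of the sort over the rows
theorem pvSortLoop (n : Int) (l : List (List Int)) (h : l.length = n.toNat) :
    (PySem.List.pyRange 0 n 1).foldl
        (fun ld x => ld.set x.toNat (PySem.List.sorted (ld.getD x.toNat []) (fun v => v) false)) l
      = l.map (fun r => PySem.List.sorted r (fun v => v) false) := by
  rw [PySem.List.pyRange_one, List.foldl_map]
  have h1 : (n - 0).toNat = l.length := by omega
  rw [h1]
  simp only [zero_add, Int.toNat_natCast]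
  rw [pvSetMap (fun r => PySem.List.sorted r (fun v => v) false) l.length l le_rfl]
  simp

-- B computes exactly the sorted rows of the described matrix
theorem pvAltEq (tab : List (List (List Int))) (n : Int) (q N : Nat)
    (hq : q = N ^ 2) (hN : N = n.toNat) :
    arrange_3d_alt tab n
      = (pvMat q N (tab.flatMap (fun layer => layer.flatMap (fun row => row)))).map
          (fun r => PySem.List.sorted r (fun v => v) false) := by
  simp only [arrange_3d_alt]
  rw [PySem.List.pyRange_one, List.map_map]
  unfold pvMat
  rw [List.map_map]
  rcases Int.lt_or_le n 0 with hneg | hpos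
  · have hN0 : N = 0 := by omega
    simp [hN0]
    omega
  · have h1 : (n - 0).toNat = N := by omega
    rw [h1]
    apply List.map_congr_left
    intro k hk
    have hn : n = (N : Int) := by omega
    have hq' : (n * n : Int) = ((q : Nat) : Int) := by rw [hn, hq]; push_cast; ring
    simp only [Function.comp_apply, zero_add]
    have e1 : ((k : Int) * (n * n)) = ((k * q : Nat) : Int) := by rw [hq']; push_cast; ring
    have e2 : (((k : Int) + 1) * (n * n)) = (((k + 1) * q : Nat) : Int) := by
      rw [hq']; push_cast; ring
    rw [e1, e2, PySem.List.slice_natCast]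
    have e3 : (k + 1) * q - k * q = q := by simp [add_mul]
    rw [e3]
    have e4 : ((n * n : Int) - ((((tab.flatMap (fun layer => layer.flatMap (fun row => row))).drop (k * q)).take q).length : Int)).toNat
        = q - (((tab.flatMap (fun layer => layer.flatMap (fun row => row))).drop (k * q)).take q).length := by
      have hle : (((tab.flatMap (fun layer => layer.flatMap (fun row => row))).drop (k * q)).take q).length ≤ q := by
        simp
      rw [hq']; omega
    rw [e4]
    rfl

-- ===== VERDICT (by name: the statement is the Claim_ definition above) =====
theorem arrange_3d_spec : Claim_equal_arrange_3d := by
  intro tab n hdom hpre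
  unfold Spec_arrange_3d
  unfold Pre_arrange_3d at hpre
  have hpre' : (tab.flatMap (fun layer => layer.flatMap (fun row => row))).length
      ≤ n.toNat * n.toNat ^ 2 := by
    have h3 : n.toNat ^ 3 = n.toNat * n.toNat ^ 2 := by ring
    exact h3 ▸ hpre
  obtain ⟨d', i', hfold⟩ := pvFold n (n.toNat ^ 2) n.toNat rfl rfl
    (tab.flatMap (fun layer => layer.flatMap (fun row => row))) [] 0 0
    (by simp) (Nat.zero_le _) (fun _ => rfl) (by simpa using hpre')
  rw [List.nil_append] at hfold
  push_cast at hfold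
  simp only [arrange_3d]
  rw [pvNest, pvInitEq n (n.toNat ^ 2) n.toNat rfl rfl, hfold]
  rw [pvSortLoop n _ (pvMat_length _ _ _)]
  exact (pvAltEq tab n (n.toNat ^ 2) n.toNat rfl rfl).symm
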